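-- pv_equiv track=rewrite | github.com/JasSmiths/Intelligent-Access-Control-System | backend/app/services/reports.py | _verbose_duration
-- ===== SOURCE A (Python) =====
-- def _verbose_duration(total_minutes: int) -> str:
--     total_days = max(0, total_minutes // (24 * 60))
--     years = total_days // 365
--     months = (total_days % 365) // 30
--     days = (total_days % 365) % 30
--     parts = [
--         _plural(years, "Year") if years else None,
--         _plural(months, "Month") if months else None,
--         _plural(days, "Day") if days else None,
--     ]
--     return ", ".join(part for part in parts if part) or "Less than 1 Day"
--
-- def _plural(value: int, singular: str) -> str:
--     return f"{value} {singular}{'' if value == 1 else 's'}"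
-- ===== SOURCE B (Python) =====
-- def _verbose_duration(total_minutes: int) -> str:
--     # Count units by repeated subtraction from a running day count
--     # instead of a floordiv/modulo chain.
--     rem = total_minutes // 1440
--     if rem < 0:
--         rem = 0
--     years = 0
--     while rem >= 365:
--         rem -= 365
--         years += 1
--     months = 0
--     while rem >= 30:
--         rem -= 30
--         months += 1
--     parts = []
--     for value, name in ((years, "Year"), (months, "Month"), (rem, "Day")):
--         if value:
--             parts.append("%d %s%s" % (value, name, "" if value == 1 else "s"))
--     return ", ".join(parts) or "Less than 1 Day"
-- ===== Notes on version B (the rewrite author's own statement) =====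
-- stated objective: alternative
-- what changed: Replaces A's floordiv/modulo chain by counting years and months via repeated-subtraction while-loops over a running day remainder, then formats the three counts in one loop.
import Mathlib
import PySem

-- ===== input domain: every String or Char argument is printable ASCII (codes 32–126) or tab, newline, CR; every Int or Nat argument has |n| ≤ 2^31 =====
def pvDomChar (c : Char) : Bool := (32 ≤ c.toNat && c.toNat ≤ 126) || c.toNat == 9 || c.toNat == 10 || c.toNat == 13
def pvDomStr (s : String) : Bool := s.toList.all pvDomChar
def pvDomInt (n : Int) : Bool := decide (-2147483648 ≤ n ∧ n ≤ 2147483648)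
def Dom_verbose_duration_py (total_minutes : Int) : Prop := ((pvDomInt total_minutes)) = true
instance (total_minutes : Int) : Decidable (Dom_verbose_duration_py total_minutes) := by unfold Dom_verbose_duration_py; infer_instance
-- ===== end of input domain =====

-- B counts years and months by repeated subtraction from a running day remainder instead of
-- A's floordiv/modulo chain (objective: alternative algorithm, same result).

-- ===== PORT A =====
def plural_py (value : Int) (singular : String) : String :=
  PySem.Int.toStr value ++ " " ++ singular ++ (if value == 1 then "" else "s")

def verbose_duration_py (total_minutes : Int) : String :=
  let total_days := max 0 (PySem.Int.floordiv total_minutes (24 * 60))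
  let years := PySem.Int.floordiv total_days 365
  let months := PySem.Int.floordiv (PySem.Int.mod total_days 365) 30
  let days := PySem.Int.mod (PySem.Int.mod total_days 365) 30
  let parts : List (Option String) :=
    [if years ≠ 0 then some (plural_py years "Year") else none,
     if months ≠ 0 then some (plural_py months "Month") else none,
     if days ≠ 0 then some (plural_py days "Day") else none]
  -- 'part for part in parts if part': keeps parts that are not None and not ""
  let joined := PySem.Str.join ", " ((parts.filterMap id).filter (fun p => p ≠ ""))
  if joined ≠ "" then joined else "Less than 1 Day"

-- ===== PORT B =====
-- 'while rem >= 365: rem -= 365; years += 1'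
def subLoop365 (rem acc : Int) : Int × Int :=
  if 365 ≤ rem then subLoop365 (rem - 365) (acc + 1) else (acc, rem)
termination_by rem.toNat
decreasing_by omega

-- 'while rem >= 30: rem -= 30; months += 1'
def subLoop30 (rem acc : Int) : Int × Int :=
  if 30 ≤ rem then subLoop30 (rem - 30) (acc + 1) else (acc, rem)
termination_by rem.toNat
decreasing_by omega

def verbose_duration_py_alt (total_minutes : Int) : String :=
  let rem0 := PySem.Int.floordiv total_minutes 1440
  let rem1 := if rem0 < 0 then (0 : Int) else rem0
  let ym := subLoop365 rem1 0
  let md := subLoop30 ym.2 0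
  let parts := [(ym.1, "Year"), (md.1, "Month"), (md.2, "Day")].foldl
      (fun (acc : List String) p =>
        if p.1 ≠ 0 then
          acc ++ [PySem.Int.toStr p.1 ++ " " ++ p.2 ++ (if p.1 == 1 then "" else "s")]
        else acc) []
  let joined := PySem.Str.join ", " parts
  if joined ≠ "" then joined else "Less than 1 Day"

-- ===== PRECONDITION & SPEC =====
def Spec_verbose_duration_py (total_minutes : Int) (out : String) : Prop := out = verbose_duration_py_alt total_minutes
instance (total_minutes : Int) (out : String) : Decidable (Spec_verbose_duration_py total_minutes out) := by unfold Spec_verbose_duration_py; infer_instance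

-- ===== CLAIM (what is proved, stated in full; the proofs are below) =====
def Claim_equal_verbose_duration_py : Prop := ∀ (total_minutes : Int), Dom_verbose_duration_py total_minutes → Spec_verbose_duration_py total_minutes (verbose_duration_py total_minutes)

-- ===== LEMMAS AND PROOFS =====

theorem subLoop365_spec (rem acc : Int) (h : 0 ≤ rem) :
    subLoop365 rem acc = (acc + rem / 365, rem % 365) := by
  induction rem, acc using subLoop365.induct with
  | case1 rem acc hge ih =>
      rw [subLoop365, if_pos hge, ih (by omega)]
      simp only [Prod.mk.injEq]; constructor <;> omega
  | case2 rem acc hlt =>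
      rw [subLoop365, if_neg hlt]
      simp only [Prod.mk.injEq]; constructor <;> omega

theorem subLoop30_spec (rem acc : Int) (h : 0 ≤ rem) :
    subLoop30 rem acc = (acc + rem / 30, rem % 30) := by
  induction rem, acc using subLoop30.induct with
  | case1 rem acc hge ih =>
      rw [subLoop30, if_pos hge, ih (by omega)]
      simp only [Prod.mk.injEq]; constructor <;> omega
  | case2 rem acc hlt =>
      rw [subLoop30, if_neg hlt]
      simp only [Prod.mk.injEq]; constructor <;> omega

theorem verbose_core (n : Int) : verbose_duration_py n = verbose_duration_py_alt n := by
  unfold verbose_duration_py verbose_duration_py_alt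
  rw [show (24 * 60 : Int) = 1440 from by norm_num]
  have hmax : max 0 (PySem.Int.floordiv n 1440)
      = if PySem.Int.floordiv n 1440 < 0 then 0 else PySem.Int.floordiv n 1440 := by
    split <;> omega
  dsimp only
  rw [hmax]
  have hge : 0 ≤ (if PySem.Int.floordiv n 1440 < 0 then (0 : Int) else PySem.Int.floordiv n 1440) := by
    split <;> omega
  revert hge
  generalize (if PySem.Int.floordiv n 1440 < 0 then (0 : Int) else PySem.Int.floordiv n 1440) = d
  intro hd0
  rw [subLoop365_spec d 0 hd0, subLoop30_spec (d % 365) 0 (Int.emod_nonneg d (by norm_num))]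
  simp only [zero_add, List.foldl]
  have hfd : PySem.Int.floordiv d 365 = d / 365 :=
    PySem.Int.floordiv_eq_ediv_of_pos (by norm_num)
  have hmd : PySem.Int.mod d 365 = d % 365 :=
    PySem.Int.mod_eq_emod_of_pos (by norm_num)
  have hfd2 : PySem.Int.floordiv (PySem.Int.mod d 365) 30 = d % 365 / 30 := by
    rw [hmd]; exact PySem.Int.floordiv_eq_ediv_of_pos (by norm_num)
  have hmd2 : PySem.Int.mod (PySem.Int.mod d 365) 30 = d % 365 % 30 := by
    rw [hmd]; exact PySem.Int.mod_eq_emod_of_pos (by norm_num)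
  rw [hfd, hfd2, hmd2]
  by_cases hy : d / 365 = 0 <;>
  by_cases hm : d % 365 / 30 = 0 <;>
  by_cases hdd : d % 365 % 30 = 0 <;>
    simp [hy, hm, hdd, plural_py]

-- ===== VERDICT (by name: the statement is the Claim_ definition above) =====
theorem verbose_duration_py_spec : Claim_equal_verbose_duration_py := by
  intro n _
  unfold Spec_verbose_duration_py
  exact verbose_core n
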